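-- pv_equiv track=rewrite | github.com/naresh852/python_Tutorials | COREY SCHAFER TUTORIAL/PRATICE/p.py | bigbinary
-- ===== SOURCE A (Python) =====
-- def bigbinary(B):
--     listofshifts = []
--     temp = B[1:] + B[0]
--     result = 0
--     while (temp != B):
--         listofshifts.append(temp)
--         temp = temp[1:] + temp[0]
--         result = max(listofshifts)
--     return result
-- ===== SOURCE B (Python) =====
-- def bigbinary(B):
--     n = len(B)
--     d = B + B
--     rots = sorted(d[i:i+n] for i in range(1, n))
--     for r in reversed(rots):
--         if r != B:
--             return r
-- ===== Notes on version B (the rewrite author's own statement) =====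
-- stated objective: faster
-- what changed: B cuts every rotation out of the doubled string B+B, SORTS the rotations once, and scans the sorted list from the top for the first one differing from B, replacing A's repeated one-character re-rotation with max() recomputed over the growing list on every iteration.
-- outside the precondition, e.g. on bigbinary('a'): A returns 0, B returns None; on bigbinary('aa'): A returns 0, B returns None; on bigbinary(''): A raises IndexError, B returns None
import Mathlib
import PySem

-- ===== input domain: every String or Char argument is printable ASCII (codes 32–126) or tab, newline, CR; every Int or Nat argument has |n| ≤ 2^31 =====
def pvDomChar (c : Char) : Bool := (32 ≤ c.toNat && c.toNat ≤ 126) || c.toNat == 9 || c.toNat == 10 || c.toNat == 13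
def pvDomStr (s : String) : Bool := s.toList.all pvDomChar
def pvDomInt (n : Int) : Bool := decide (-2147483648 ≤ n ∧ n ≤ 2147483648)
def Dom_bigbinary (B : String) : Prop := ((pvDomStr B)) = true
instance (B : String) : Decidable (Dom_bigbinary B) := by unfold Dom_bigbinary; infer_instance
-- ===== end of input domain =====

-- B slices every rotation out of the doubled string B+B, sorts the rotations once and scans the
-- sorted list from the top for the first one differing from B, instead of A's one-character
-- re-rotation loop with max() recomputed over the growing list each iteration; objective: faster.

-- ===== PORT A =====
-- temp[1:] + temp[0] on a nonempty string ([] stands in for the IndexError case, excluded by Pre_)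
def pvRot (l : List Char) : List Char := l.drop 1 ++ l.take 1

-- A's while-loop, step for step; fuel = len(B) suffices since len(B) one-char rotations return to B.
-- 'result' starts as Python's 0; we carry [] (only returned outside Pre_, where A's value is the int 0).
-- result = max(listofshifts): shifts' is never empty in the loop, so the .getD default is never used.
def pvLoopA (B : List Char) : Nat → List Char → List (List Char) → List Char → List Char
  | 0, _, _, res => res
  | f+1, temp, shifts, res =>
    if temp = B then res
    else
      let shifts' := shifts ++ [temp]
      pvLoopA B f (pvRot temp) shifts' ((PySem.List.max? shifts' (fun x => x)).getD res)

def bigbinary (B : String) : String :=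
  String.ofList (pvLoopA B.toList B.toList.length (pvRot B.toList) [] [])

-- ===== PORT B =====
-- n = len(B); d = B + B; rots = sorted(d[i:i+n] for i in range(1, n))
-- for r in reversed(rots): if r != B: return r      (find? on the reversed sorted list)
-- ([] is the stand-in for Python's implicit None, returned only outside Pre_)
def bigbinary_alt (B : String) : String :=
  String.ofList
    (((PySem.List.sorted
        ((PySem.List.pyRange 1 (B.toList.length : Int) 1).map
          (fun i => PySem.List.slice (B.toList ++ B.toList) (some i)
            (some (i + (B.toList.length : Int)))))
        (fun x => x) false).reverse.find? (fun r => decide (r ≠ B.toList))).getD [])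

-- ===== PRECONDITION & SPEC =====
-- Pre_ excludes the empty string (A raises IndexError) and strings whose one-step rotation equals
-- the string itself (length ≤ 1 or all characters equal): there A returns the int 0, not a string.
def Pre_bigbinary (B : String) : Prop :=
  B.toList ≠ [] ∧ B.toList.drop 1 ++ B.toList.take 1 ≠ B.toList
instance (B : String) : Decidable (Pre_bigbinary B) := by unfold Pre_bigbinary; infer_instance

def pvWitness_bigbinary : String := "ab"

def Spec_bigbinary (B : String) (out : String) : Prop := out = bigbinary_alt B
instance (B : String) (out : String) : Decidable (Spec_bigbinary B out) := by unfold Spec_bigbinary; infer_instance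

-- ===== CLAIM (what is proved, stated in full; the proofs are below) =====
def Claim_equal_bigbinary : Prop := ∀ (B : String), Dom_bigbinary B → Pre_bigbinary B → Spec_bigbinary B (bigbinary B)

-- ===== LEMMAS AND PROOFS =====

theorem pvRot_eq_rotate (l : List Char) : pvRot l = l.rotate 1 := by
  cases l with
  | nil => rfl
  | cons a t => exact (List.rotate_eq_drop_append_take (by simp)).symm

theorem pvRotate_mul (l : List Char) (p : Nat) (hp : l.rotate p = l) (q : Nat) :
    l.rotate (p * q) = l := by
  induction q with
  | zero => simp
  | succ q ih =>
    have h : p * (q + 1) = p * q + p := by ring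
    rw [h, ← List.rotate_rotate, ih, hp]

theorem pvRotate_mod (l : List Char) (p : Nat) (hp : l.rotate p = l) (k : Nat) :
    l.rotate k = l.rotate (k % p) := by
  calc l.rotate k = l.rotate (p * (k / p) + k % p) := by rw [Nat.div_add_mod k p]
    _ = (l.rotate (p * (k / p))).rotate (k % p) := (List.rotate_rotate l _ _).symm
    _ = l.rotate (k % p) := by rw [pvRotate_mul l p hp]

-- the default lexicographic < on List Char is the one of its LinearOrder
theorem pvLT_iff (a b : List Char) :
    a < b ↔ (@LT.lt (List Char) List.instLinearOrder.toLT a b) := by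
  show List.lt a b ↔ _
  rw [List.lt_iff_lex_lt]
  exact Iff.rfl

-- max?'s running maximum dominates everything it has seen (default lex order on List Char)
theorem pvFold_isMax (f : Option (List Char) → List Char → Option (List Char))
    (hfn : ∀ x, f none x = some x)
    (hfs : ∀ b x, f (some b) x = if b < x then some x else some b)
    (xs : List (List Char)) :
    ∀ (acc : Option (List Char)) (m : List Char), List.foldl f acc xs = some m →
    (∀ y ∈ xs, ¬ m < y) ∧ (∀ a, acc = some a → ¬ m < a) := by
  induction xs with
  | nil =>
    intro acc m h
    simp only [List.foldl_nil] at h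
    constructor
    · intro y hy
      simp at hy
    · intro a ha
      rw [ha] at h
      have ham : a = m := Option.some.inj h
      subst ham
      rw [pvLT_iff]
      exact lt_irrefl a
  | cons x t ih =>
    intro acc m h
    simp only [List.foldl_cons] at h
    obtain ⟨ht, hacc⟩ := ih _ m h
    have hx : ¬ m < x := by
      cases acc with
      | none => exact hacc x (hfn x)
      | some b =>
        by_cases hbx : b < x
        · exact hacc x (by rw [hfs, if_pos hbx])
        · have hb := hacc b (by rw [hfs, if_neg hbx])
          rw [pvLT_iff, not_lt] at hb hbx ⊢
          exact le_trans hbx hb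
    refine ⟨?_, ?_⟩
    · intro y hy
      rcases List.mem_cons.mp hy with rfl | hyt
      · exact hx
      · exact ht y hyt
    · intro a ha
      cases acc with
      | none => simp at ha
      | some b =>
        have hab : b = a := Option.some.inj ha
        subst hab
        by_cases hbx : b < x
        · have hxm := hacc x (by rw [hfs, if_pos hbx])
          rw [pvLT_iff, not_lt] at hxm ⊢
          rw [pvLT_iff] at hbx
          exact le_trans (le_of_lt hbx) hxm
        · exact hacc b (by rw [hfs, if_neg hbx])

theorem pvMax?_isMax (xs : List (List Char)) (m : List Char)
    (h : PySem.List.max? xs (fun x => x) = some m) : ∀ y ∈ xs, ¬ m < y := by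
  simp only [PySem.List.max?] at h
  exact (pvFold_isMax _ (fun x => rfl) (fun b x => rfl) xs none m h).1

theorem pvMax?_some (xs : List (List Char)) (hne : xs ≠ []) :
    ∃ m, PySem.List.max? xs (fun x => x) = some m := by
  cases hx : PySem.List.max? xs (fun x => x) with
  | none => exact absurd ((PySem.List.max?_eq_none_iff xs _).mp hx) hne
  | some m => exact ⟨m, rfl⟩

theorem pvMax?_congr_mem (xs ys : List (List Char))
    (hxy : ∀ x ∈ xs, x ∈ ys) (hyx : ∀ y ∈ ys, y ∈ xs) :
    PySem.List.max? xs (fun x => x) = PySem.List.max? ys (fun x => x) := by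
  cases hx : PySem.List.max? xs (fun x => x) with
  | none =>
    cases hy : PySem.List.max? ys (fun x => x) with
    | none => rfl
    | some my =>
      have hmem := hyx my (PySem.List.max?_mem hy)
      rw [(PySem.List.max?_eq_none_iff xs _).mp hx] at hmem
      simp at hmem
  | some mx =>
    cases hy : PySem.List.max? ys (fun x => x) with
    | none =>
      have hmem := hxy mx (PySem.List.max?_mem hx)
      rw [(PySem.List.max?_eq_none_iff ys _).mp hy] at hmem
      simp at hmem
    | some my =>
      have hA : ¬ my < mx := pvMax?_isMax ys my hy mx (hxy mx (PySem.List.max?_mem hx))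
      have hB : ¬ mx < my := pvMax?_isMax xs mx hx my (hyx my (PySem.List.max?_mem hy))
      rw [pvLT_iff, not_lt] at hA hB
      exact congrArg some (le_antisymm hA hB)

-- A's loop computes max(shifts ++ [rotate i, ..., rotate (p-1)]) when entered at temp = rotate i
theorem pvLoopA_spec (l : List Char) (p : Nat)
    (hmin : ∀ j, 1 ≤ j → j < p → l.rotate j ≠ l) (hp : l.rotate p = l) :
    ∀ f i shifts res, 1 ≤ i → i ≤ p → p ≤ i + f →
    (shifts ≠ [] → res = (PySem.List.max? shifts (fun x => x)).getD []) →
    pvLoopA l f (l.rotate i) shifts res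
      = (PySem.List.max? (shifts ++ (List.range (p - i)).map (fun k => l.rotate (i + k)))
          (fun x => x)).getD res := by
  intro f
  induction f with
  | zero =>
    intro i shifts res h1 hip hf hres
    have hi : i = p := by omega
    subst hi
    simp only [Nat.sub_self, List.range_zero, List.map_nil, List.append_nil, pvLoopA]
    cases shifts with
    | nil => rfl
    | cons s t =>
      obtain ⟨m, hm⟩ := pvMax?_some (s :: t) (by simp)
      rw [hres (by simp), hm]
      rfl
  | succ f ih =>
    intro i shifts res h1 hip hf hres
    by_cases hi : i = p
    · subst hi
      simp only [pvLoopA, if_pos hp, Nat.sub_self, List.range_zero, List.map_nil,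
        List.append_nil]
      cases shifts with
      | nil => rfl
      | cons s t =>
        obtain ⟨m, hm⟩ := pvMax?_some (s :: t) (by simp)
        rw [hres (by simp), hm]
        rfl
    · have hilt : i < p := lt_of_le_of_ne hip hi
      have hne : l.rotate i ≠ l := hmin i h1 hilt
      simp only [pvLoopA, if_neg hne]
      rw [pvRot_eq_rotate, List.rotate_rotate]
      obtain ⟨m1, hm1⟩ := pvMax?_some (shifts ++ [l.rotate i]) (by simp)
      have hstep := ih (i + 1) (shifts ++ [l.rotate i])
        ((PySem.List.max? (shifts ++ [l.rotate i]) (fun x => x)).getD res)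
        (by omega) (by omega) (by omega)
        (by intro _; rw [hm1]; rfl)
      rw [hstep]
      have hr : p - i = (p - (i + 1)) + 1 := by omega
      have hfun : (fun k => l.rotate (i + 1 + k)) = ((fun k => l.rotate (i + k)) ∘ Nat.succ) := by
        funext k
        simp only [Function.comp_apply]
        congr 1
        omega
      have hlist : (shifts ++ [l.rotate i]) ++ (List.range (p - (i + 1))).map
            (fun k => l.rotate (i + 1 + k))
          = shifts ++ (List.range (p - i)).map (fun k => l.rotate (i + k)) := by
        rw [hr, List.range_succ_eq_map, List.map_cons, List.map_map, ← hfun,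
          List.append_assoc]
        simp
      rw [hlist]
      obtain ⟨m2, hm2⟩ := pvMax?_some
        (shifts ++ (List.range (p - i)).map (fun k => l.rotate (i + k))) (by simp [hr])
      rw [hm2]
      rfl

-- B's un-sorted rotation list is [rotate 1, ..., rotate (n-1)] (cut out of the doubled string)
theorem pvRotations_eq (l : List Char) :
    ((PySem.List.pyRange 1 (l.length : Int) 1).map
      (fun i => PySem.List.slice (l ++ l) (some i) (some (i + (l.length : Int)))))
    = (List.range (l.length - 1)).map (fun k => l.rotate (1 + k)) := by
  rw [PySem.List.pyRange_one]
  have ht : (((l.length : Int)) - 1).toNat = l.length - 1 := by omega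
  rw [ht, List.map_map]
  apply List.map_congr_left
  intro k hk
  have hk' : k < l.length - 1 := List.mem_range.mp hk
  have hle : 1 + k ≤ l.length := by omega
  simp only [Function.comp_apply]
  have hc : (1 : Int) + (k : Int) = ((1 + k : Nat) : Int) := by push_cast; ring
  rw [hc, PySem.List.slice_natCast_add]
  -- take n of drop j (l ++ l) is rotate j, for j ≤ n
  rw [List.rotate_eq_drop_append_take hle, List.drop_append_of_le_length hle, List.take_append]
  congr 1
  · exact List.take_of_length_le (by simp)
  · simp only [List.length_drop]
    congr 1
    omega

-- bridge: PySem.List.sorted at the default List-Char order = at its LinearOrder order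
theorem pvSorted_bridge (xs : List (List Char)) :
    PySem.List.sorted xs (fun x => x) false
      = @PySem.List.sorted (List Char) (List Char) List.instLinearOrder.toLT
          (fun a b => LinearOrder.toDecidableLT a b) xs (fun x => x) false := by
  rw [PySem.List.sorted_eq_foldl_insertBy,
    @PySem.List.sorted_eq_foldl_insertBy (List Char) (List Char) List.instLinearOrder.toLT
      (fun a b => LinearOrder.toDecidableLT a b)]
  congr 1
  funext acc x
  congr 1
  funext a b
  exact decide_eq_decide.mpr (pvLT_iff a b)

-- find? over a ≤-descending list returns a maximal element among those satisfying the predicate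
theorem pvFindDesc (p : List Char → Bool) (t : List (List Char))
    (hd : t.Pairwise (fun a b => b ≤ a)) (m : List Char) (hf : t.find? p = some m) :
    m ∈ t ∧ p m = true ∧ ∀ y ∈ t, p y = true → y ≤ m := by
  induction t with
  | nil => simp at hf
  | cons a t ih =>
    rcases List.pairwise_cons.mp hd with ⟨ha, ht⟩
    by_cases hpa : p a = true
    · rw [List.find?_cons_of_pos hpa] at hf
      have ham : a = m := Option.some.inj hf
      subst ham
      refine ⟨List.mem_cons_self, hpa, ?_⟩
      intro y hy _
      rcases List.mem_cons.mp hy with rfl | hyt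
      · exact le_refl y
      · exact ha y hyt
    · rw [List.find?_cons_of_neg (by simpa using hpa)] at hf
      obtain ⟨hm1, hm2, hm3⟩ := ih ht hf
      refine ⟨List.mem_cons_of_mem a hm1, hm2, ?_⟩
      intro y hy hpy
      rcases List.mem_cons.mp hy with rfl | hyt
      · exact absurd hpy hpa
      · exact hm3 y hyt hpy

theorem bigbinary_spec_aux (B : String) (h : Pre_bigbinary B) :
    bigbinary B = bigbinary_alt B := by
  obtain ⟨hne, hr1⟩ := h
  set l := B.toList with hl
  have hnpos : 0 < l.length := List.length_pos_iff.mpr hne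
  have hrot1 : l.rotate 1 ≠ l := by rw [← pvRot_eq_rotate]; exact hr1
  have hex : ∃ k, 0 < k ∧ l.rotate k = l := ⟨l.length, hnpos, List.rotate_length l⟩
  set p := Nat.find hex with hpdef
  have hspec := Nat.find_spec hex
  have hppos : 0 < p := hspec.1
  have hp : l.rotate p = l := hspec.2
  have hmin : ∀ j, 1 ≤ j → j < p → l.rotate j ≠ l := by
    intro j hj1 hjp hjeq
    exact Nat.find_min hex hjp ⟨hj1, hjeq⟩
  have hplen : p ≤ l.length := Nat.find_le ⟨hnpos, List.rotate_length l⟩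
  have hp2 : 2 ≤ p := by
    by_cases hp1 : p = 1
    · rw [hp1] at hp
      exact absurd hp hrot1
    · omega
  -- the full rotation list and the nonempty filtered list
  set rotsAll := (List.range (l.length - 1)).map (fun k => l.rotate (1 + k)) with hrotsAll
  set pred : List Char → Bool := fun r => decide (r ≠ l) with hpred
  -- A's side: max over rotations 1..p-1 = max over the filtered full list
  have hA : pvLoopA l l.length (pvRot l) [] []
      = (PySem.List.max? ((List.range (p - 1)).map (fun k => l.rotate (1 + k)))
          (fun x => x)).getD [] := by
    rw [pvRot_eq_rotate]
    have := pvLoopA_spec l p hmin hp l.length 1 [] [] (by omega) (by omega) (by omega)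
      (fun hc => absurd rfl hc)
    simpa using this
  have hmax : PySem.List.max? ((List.range (p - 1)).map (fun k => l.rotate (1 + k))) (fun x => x)
      = PySem.List.max? (rotsAll.filter pred) (fun x => x) := by
    apply pvMax?_congr_mem
    · intro x hx
      rcases List.mem_map.mp hx with ⟨k, hk, rfl⟩
      have hk' : k < p - 1 := List.mem_range.mp hk
      refine List.mem_filter.mpr ⟨List.mem_map.mpr ⟨k, List.mem_range.mpr (by omega), rfl⟩, ?_⟩
      exact decide_eq_true (hmin (1 + k) (by omega) (by omega))
    · intro y hy
      rcases List.mem_filter.mp hy with ⟨hy1, hy2⟩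
      rcases List.mem_map.mp hy1 with ⟨k, hk, rfl⟩
      have hyne : l.rotate (1 + k) ≠ l := of_decide_eq_true hy2
      have hmod : l.rotate (1 + k) = l.rotate ((1 + k) % p) := pvRotate_mod l p hp (1 + k)
      have hrpos : (1 + k) % p ≠ 0 := by
        intro h0
        rw [hmod, h0, List.rotate_zero] at hyne
        exact hyne rfl
      have hrlt : (1 + k) % p < p := Nat.mod_lt _ hppos
      refine List.mem_map.mpr ⟨(1 + k) % p - 1, List.mem_range.mpr (by omega), ?_⟩
      rw [hmod]
      congr 1
      omega
  obtain ⟨M, hM⟩ := pvMax?_some (rotsAll.filter pred)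
    (by
      intro hnil
      have : l.rotate 1 ∈ rotsAll.filter pred :=
        List.mem_filter.mpr ⟨List.mem_map.mpr ⟨0, List.mem_range.mpr (by omega), by simp⟩,
          decide_eq_true hrot1⟩
      rw [hnil] at this
      simp at this)
  -- B's side: the sorted list, its reverse is descending
  set s := PySem.List.sorted rotsAll (fun x => x) false with hs
  have hpw : s.Pairwise (fun a b : List Char => a ≤ b) := by
    rw [hs, pvSorted_bridge]
    exact PySem.List.sorted_pairwise rotsAll (fun x => x)
  have hpwrev : s.reverse.Pairwise (fun a b : List Char => b ≤ a) :=
    (List.pairwise_reverse).mpr hpw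
  have hmemS : ∀ x, x ∈ s.reverse ↔ x ∈ rotsAll := by
    intro x
    rw [List.mem_reverse, hs, PySem.List.mem_sorted]
  have hfind : ∃ m, s.reverse.find? pred = some m := by
    have hsome : (s.reverse.find? pred).isSome := by
      rw [List.find?_isSome]
      exact ⟨l.rotate 1, (hmemS _).mpr (List.mem_map.mpr ⟨0, List.mem_range.mpr (by omega), by simp⟩),
        decide_eq_true hrot1⟩
    cases hx : s.reverse.find? pred with
    | none => rw [hx] at hsome; simp at hsome
    | some m => exact ⟨m, rfl⟩
  obtain ⟨m, hm⟩ := hfind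
  obtain ⟨hm1, hm2, hm3⟩ := pvFindDesc pred s.reverse hpwrev m hm
  -- m = M
  have hMfilter := List.mem_filter.mp (PySem.List.max?_mem hM)
  have hMle : M ≤ m := hm3 M ((hmemS M).mpr hMfilter.1) hMfilter.2
  have hmle : m ≤ M := by
    have hmmem : m ∈ rotsAll.filter pred := List.mem_filter.mpr ⟨(hmemS m).mp hm1, hm2⟩
    have := pvMax?_isMax _ M hM m hmmem
    rw [pvLT_iff, not_lt] at this
    exact this
  have hmM : m = M := le_antisymm hmle hMle
  -- assemble
  show String.ofList (pvLoopA l l.length (pvRot l) [] []) = bigbinary_alt B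
  unfold bigbinary_alt
  rw [← hl, pvRotations_eq l, ← hrotsAll, ← hs, hm, hA, hmax, hM]
  simp [hmM]

-- ===== VERDICT (by name: the statement is the Claim_ definition above) =====
theorem bigbinary_spec : Claim_equal_bigbinary := by
  intro B _ hpre
  unfold Spec_bigbinary
  exact bigbinary_spec_aux B hpre
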